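-- pv_equiv track=rewrite | github.com/Navya123445/SEM-Campaign-Builder | src/collectors/website_analyzer.py | _extract_business_terms
-- ===== SOURCE A (Python) =====
-- from typing import List, Dict
--
-- def _extract_business_terms(text: str) -> List[str]:
--     """Extract business-relevant terms from feature text"""
--     business_indicators = [
--         'platform', 'software', 'solution', 'system', 'tool', 'service',
--         'analytics', 'management', 'automation', 'intelligence', 'dashboard',
--         'reporting', 'integration', 'optimization', 'tracking'
--     ]
--
--     terms = []
--     text_lower = text.lower()
--     words = text_lower.split()
--
--     for indicator in business_indicators:
--         if indicator in text_lower: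
--             # Find the phrase containing this indicator
--             for i, word in enumerate(words):
--                 if indicator in word:
--                     # Get surrounding context
--                     start = max(0, i-1)
--                     end = min(len(words), i+2)
--                     phrase = ' '.join(words[start:end])
--                     if len(phrase) > 5:
--                         terms.append(phrase)
--                     break
--
--     return terms[:3]
-- ===== SOURCE B (Python) =====
-- from typing import List, Dict
--
-- def _extract_business_terms(text: str) -> List[str]:
--     """Extract business-relevant terms from feature text"""
--     business_indicators = [
--         'platform', 'software', 'solution', 'system', 'tool', 'service',
--         'analytics', 'management', 'automation', 'intelligence', 'dashboard',
--         'reporting', 'integration', 'optimization', 'tracking'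
--     ]
--
--     words = text.lower().split()
--
--     # one pass over the words: first word-index at which each indicator occurs
--     first: Dict[str, int] = {}
--     for i, word in enumerate(words):
--         for indicator in business_indicators:
--             if indicator not in first and indicator in word:
--                 first[indicator] = i
--
--     terms = []
--     for indicator in business_indicators:
--         if indicator in first:
--             i = first[indicator]
--             phrase = ' '.join(words[max(0, i - 1):min(len(words), i + 2)])
--             if len(phrase) > 5:
--                 terms.append(phrase)
--
--     return terms[:3]
-- ===== Notes on version B (the rewrite author's own statement) =====
-- stated objective: alternative
-- what changed: Inverts the loop nesting: one pass over enumerate(words) records in a dict the first word-index containing each indicator, then a single fold over the indicator list builds the phrases from that table, instead of re-scanning the text and the word list once per indicator.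
import Mathlib
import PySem

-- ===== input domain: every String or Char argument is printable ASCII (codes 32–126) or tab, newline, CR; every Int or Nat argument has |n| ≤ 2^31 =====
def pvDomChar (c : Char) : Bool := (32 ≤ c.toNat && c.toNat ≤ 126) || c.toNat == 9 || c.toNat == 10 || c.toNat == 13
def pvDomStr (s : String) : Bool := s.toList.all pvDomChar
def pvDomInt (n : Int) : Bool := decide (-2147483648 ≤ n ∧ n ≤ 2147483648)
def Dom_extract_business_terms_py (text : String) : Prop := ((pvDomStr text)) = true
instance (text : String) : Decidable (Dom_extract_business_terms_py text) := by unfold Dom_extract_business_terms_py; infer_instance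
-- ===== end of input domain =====

-- B inverts A's loop nesting: one pass over the words records the first index containing each
-- indicator in a dict, then one fold over the indicator list builds the phrases (objective: alternative).

-- ===== PORT A =====
def pvIndicators : List String :=
  ["platform", "software", "solution", "system", "tool", "service",
   "analytics", "management", "automation", "intelligence", "dashboard",
   "reporting", "integration", "optimization", "tracking"]

-- ' '.join(words[max(0, i-1):min(len(words), i+2)]) — identical expression in Source A and Source B
def pvPhrase (words : List String) (i : Int) : String :=
  PySem.Str.join " " (PySem.List.slice words (some (max 0 (i - 1))) (some (min (words.length : Int) (i + 2))))

-- A's inner 'for i, word in enumerate(words): if indicator in word: …; break'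
def pvScanA (ind : String) (words : List String) (terms : List String) :
    List (Int × String) → List String
  | [] => terms
  | iw :: rest =>
    if PySem.Str.isIn ind iw.2 then
      let phrase := pvPhrase words iw.1
      if 5 < PySem.Str.len phrase then terms ++ [phrase] else terms
    else pvScanA ind words terms rest

def extract_business_terms_py (text : String) : List String :=
  let textLower := PySem.Str.lower text
  let words := PySem.Str.split₀ textLower
  let terms := pvIndicators.foldl
    (fun terms ind =>
      if PySem.Str.isIn ind textLower then pvScanA ind words terms (PySem.List.enumerate words)
      else terms) []
  PySem.List.slice terms none (some 3)

-- ===== PORT B =====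
-- one pass: first word-index at which each indicator occurs, as a dict
def pvFirstIdx (words : List String) : PySem.Dict String Int :=
  (PySem.List.enumerate words).foldl
    (fun d iw =>
      pvIndicators.foldl
        (fun d ind => if !d.contains ind && PySem.Str.isIn ind iw.2 then d.insert ind iw.1 else d)
        d)
    PySem.Dict.empty

def extract_business_terms_py_alt (text : String) : List String :=
  let words := PySem.Str.split₀ (PySem.Str.lower text)
  let first := pvFirstIdx words
  let terms := pvIndicators.foldl
    (fun terms ind =>
      match first.get? ind with
      | none => terms
      | some i =>
        let phrase := pvPhrase words i
        if 5 < PySem.Str.len phrase then terms ++ [phrase] else terms) []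
  PySem.List.slice terms none (some 3)

-- ===== PRECONDITION & SPEC =====
def Spec_extract_business_terms_py (text : String) (out : List String) : Prop := out = extract_business_terms_py_alt text
instance (text : String) (out : List String) : Decidable (Spec_extract_business_terms_py text out) := by unfold Spec_extract_business_terms_py; infer_instance

-- ===== CLAIM (what is proved, stated in full; the proofs are below) =====
def Claim_equal_extract_business_terms_py : Prop := ∀ (text : String), Dom_extract_business_terms_py text → Spec_extract_business_terms_py text (extract_business_terms_py text)

-- ===== LEMMAS AND PROOFS =====

-- every word produced by split() is an infix of the original character list
theorem pv_split₀_go_infix (s : List Char) :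
    ∀ (cur : List Char) (acc : List (List Char)) (w : List Char), w ∈ PySem.Chars.split₀.go s cur acc →
      w ∈ acc ∨ w <:+: (cur.reverse ++ s) := by
  induction s with
  | nil =>
    intro cur acc w h
    simp only [PySem.Chars.split₀.go] at h
    split at h
    · simp at h; exact Or.inl h
    · simp at h
      rcases h with h | h
      · exact Or.inl h
      · exact Or.inr (by simp [h])
  | cons c rest ih =>
    intro cur acc w h
    simp only [PySem.Chars.split₀.go] at h
    split at h
    · split at h
      · rcases ih [] acc w h with h' | h'
        · exact Or.inl h'
        · exact Or.inr (h'.trans ⟨cur.reverse ++ [c], [], by simp⟩)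
      · rcases ih [] (cur.reverse :: acc) w h with h' | h'
        · rcases List.mem_cons.mp h' with h'' | h''
          · subst h''; exact Or.inr ⟨[], c :: rest, by simp⟩
          · exact Or.inl h''
        · exact Or.inr (h'.trans ⟨cur.reverse ++ [c], [], by simp⟩)
    · rcases ih (c :: cur) acc w h with h' | h'
      · exact Or.inl h'
      · exact Or.inr (by simpa using h')

theorem pv_mem_split₀_infix (s w : String) (h : w ∈ PySem.Str.split₀ s) :
    w.toList <:+: s.toList := by
  have h1 : w.toList ∈ PySem.Chars.split₀ s.toList := by
    rw [← PySem.Str.split₀_map_toList]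
    exact List.mem_map_of_mem h
  simpa using pv_split₀_go_infix s.toList [] [] w.toList h1

-- characterize A's inner scan by find?
theorem pvScanA_eq (ind : String) (words terms : List String) (pairs : List (Int × String)) :
    pvScanA ind words terms pairs =
      match pairs.find? (fun iw => PySem.Str.isIn ind iw.2) with
      | none => terms
      | some iw =>
        if 5 < PySem.Str.len (pvPhrase words iw.1) then terms ++ [pvPhrase words iw.1] else terms := by
  induction pairs with
  | nil => rfl
  | cons iw rest ih =>
    by_cases h : PySem.Str.isIn ind iw.2 = true
    · rw [List.find?_cons_of_pos (by simpa using h)]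
      simp only [pvScanA, h, if_true]
    · rw [List.find?_cons_of_neg (by simpa using h)]
      simp only [pvScanA, h]
      exact ih

-- the inner (per-word) fold of pvFirstIdx, observed at key ind
theorem pv_inner_get? (i : Int) (w : String) (ind : String) :
    ∀ (L : List String) (d : PySem.Dict String Int),
      ((L.foldl (fun d ind' => if !d.contains ind' && PySem.Str.isIn ind' w then d.insert ind' i else d) d).get? ind)
        = if ind ∈ L ∧ d.contains ind = false ∧ PySem.Str.isIn ind w then some i else d.get? ind := by
  intro L
  induction L with
  | nil => intro d; simp
  | cons ind' L ih =>
    intro d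
    simp only [List.foldl_cons]
    rw [ih]
    by_cases he : ind = ind'
    · subst he
      by_cases hc : d.contains ind = true
      · simp [hc]
      · by_cases hw : PySem.Chars.isIn ind.toList w.toList = true
        · simp [hc, hw, PySem.Dict.get?_insert_self]
        · simp [hc, hw]
    · by_cases hb : (!d.contains ind' && PySem.Str.isIn ind' w) = true
      · simp only [hb, if_true]
        rw [PySem.Dict.contains_insert, PySem.Dict.get?_insert_of_ne _ _ he]
        simp [he]
      · simp only [hb]
        simp [he]

-- the dict built by B holds, at any listed indicator, the first enumerated hit
theorem pv_firstIdx_get? (ind : String) (hmem : ind ∈ pvIndicators) :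
    ∀ (pairs : List (Int × String)) (d : PySem.Dict String Int),
      ((pairs.foldl
          (fun d iw =>
            pvIndicators.foldl
              (fun d ind' => if !d.contains ind' && PySem.Str.isIn ind' iw.2 then d.insert ind' iw.1 else d) d)
          d).get? ind)
        = (d.get? ind).or ((pairs.find? (fun iw => PySem.Str.isIn ind iw.2)).map Prod.fst) := by
  intro pairs
  induction pairs with
  | nil => intro d; simp
  | cons iw rest ih =>
    intro d
    simp only [List.foldl_cons]
    rw [ih, pv_inner_get?]
    by_cases hw : PySem.Chars.isIn ind.toList iw.2.toList = true
    · rw [List.find?_cons_of_pos (by simpa using hw)]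
      rcases hq : d.get? ind with _ | v
      · have hc : d.contains ind = false := by
          rw [PySem.Dict.contains_eq_isSome_get?, hq]; rfl
        simp [hmem, hc, hw]
      · have hc : d.contains ind = true := by
          rw [PySem.Dict.contains_eq_isSome_get?, hq]; rfl
        simp [hc]
    · rw [List.find?_cons_of_neg (by simpa using hw)]
      simp [hw]

-- ===== VERDICT (by name: the statement is the Claim_ definition above) =====
theorem pv_step_eq (text : String) (terms : List String) (ind : String) (hmem : ind ∈ pvIndicators) :
    (if PySem.Str.isIn ind (PySem.Str.lower text) then
       pvScanA ind (PySem.Str.split₀ (PySem.Str.lower text)) terms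
         (PySem.List.enumerate (PySem.Str.split₀ (PySem.Str.lower text)))
     else terms)
    = match (pvFirstIdx (PySem.Str.split₀ (PySem.Str.lower text))).get? ind with
      | none => terms
      | some i =>
        if 5 < PySem.Str.len (pvPhrase (PySem.Str.split₀ (PySem.Str.lower text)) i) then
          terms ++ [pvPhrase (PySem.Str.split₀ (PySem.Str.lower text)) i]
        else terms := by
  set tl := PySem.Str.lower text with htl
  set ws := PySem.Str.split₀ tl with hws
  have hget : (pvFirstIdx ws).get? ind
      = ((PySem.List.enumerate ws).find? (fun iw => PySem.Str.isIn ind iw.2)).map Prod.fst := by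
    unfold pvFirstIdx
    rw [pv_firstIdx_get? ind hmem]
    simp [PySem.Dict.empty, PySem.Dict.get?]
  rw [hget]
  rcases hf : (PySem.List.enumerate ws).find? (fun iw => PySem.Str.isIn ind iw.2) with _ | iw
  · rw [pvScanA_eq, hf]
    simp
  · have hP : PySem.Str.isIn ind iw.2 = true := by simpa using List.find?_some hf
    have hmem2 : iw ∈ PySem.List.enumerate ws := List.mem_of_find?_eq_some hf
    have hw2 : iw.2 ∈ ws := by
      rcases (PySem.List.mem_enumerate_iff ws 0 iw).mp hmem2 with ⟨k, hk, hp⟩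
      rw [hp]
      exact List.getElem_mem hk
    have hin : PySem.Str.isIn ind tl = true := by
      rw [PySem.Str.isIn_iff_infix]
      exact ((PySem.Str.isIn_iff_infix ind iw.2).mp hP).trans (pv_mem_split₀_infix tl iw.2 hw2)
    rw [hin, if_pos rfl, pvScanA_eq, hf]
    rfl

theorem extract_business_terms_py_spec : Claim_equal_extract_business_terms_py := by
  intro text _
  show extract_business_terms_py text = extract_business_terms_py_alt text
  simp only [extract_business_terms_py, extract_business_terms_py_alt]
  rw [PySem.List.foldl_congr_mem pvIndicators _ _ []
    (fun terms ind hmem => pv_step_eq text terms ind hmem)]
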